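-- pv_equiv track=rewrite | github.com/KmNeetuSingh/Javascript-Interview- | Day-4/Contest.py | man_of_the_match
-- ===== SOURCE A (Python) =====
-- def man_of_the_match(t, test_cases):
--     results = []
--     for i in range(t):
--         n, runs = test_cases[i]
--         balls = 6 * n
--
--         virat_score = 0
--         ab_score = 0
--         striker = "AB"
--
--         for j in range(balls):
--             if striker == "AB":
--                 ab_score += runs[j]
--             else:
--                 virat_score += runs[j]
--
--             # Strike rotates if the run is 1 or 3
--             if runs[j] in [1, 3]:
--                 striker = "Virat" if striker == "AB" else "AB"
--
--             # Strike rotates every 6 balls (end of over)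
--             if (j + 1) % 6 == 0:
--                 striker = "Virat" if striker == "AB" else "AB"
--
--         if virat_score > ab_score:
--             results.append("Virat Kohli")
--         elif ab_score > virat_score:
--             results.append("AB de Villiers")
--         else:
--             results.append("Tie")
--
--     return results
-- ===== SOURCE B (Python) =====
-- def _solve(n, runs):
--     balls = 6 * n
--     # parity table: par[j] == 0 iff AB de Villiers faces ball j
--     par = []
--     acc = 0
--     for j in range(balls):
--         par.append((acc + j // 6) % 2)
--         if runs[j] in (1, 3):
--             acc += 1
--     ab = sum(runs[j] for j in range(balls) if par[j] == 0)
--     virat = sum(runs[j] for j in range(balls) if par[j] == 1)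
--     if virat > ab:
--         return "Virat Kohli"
--     elif ab > virat:
--         return "AB de Villiers"
--     return "Tie"
--
--
-- def man_of_the_match(t, test_cases):
--     return [_solve(n, runs) for n, runs in test_cases[:max(t, 0)]]
-- ===== Notes on version B (the rewrite author's own statement) =====
-- stated objective: alternative
-- what changed: Replaces A's fused stateful loop (running striker string mutated by two rotation rules while tallying both scores) with a build-table-then-reduce decomposition: first a parity table par[j] = (prefix count of strike-rotating runs + j//6) mod 2, then the two scores as filtered sums over that table, with the outer index loop replaced by iteration over test_cases[:max(t,0)].
import Mathlib
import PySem

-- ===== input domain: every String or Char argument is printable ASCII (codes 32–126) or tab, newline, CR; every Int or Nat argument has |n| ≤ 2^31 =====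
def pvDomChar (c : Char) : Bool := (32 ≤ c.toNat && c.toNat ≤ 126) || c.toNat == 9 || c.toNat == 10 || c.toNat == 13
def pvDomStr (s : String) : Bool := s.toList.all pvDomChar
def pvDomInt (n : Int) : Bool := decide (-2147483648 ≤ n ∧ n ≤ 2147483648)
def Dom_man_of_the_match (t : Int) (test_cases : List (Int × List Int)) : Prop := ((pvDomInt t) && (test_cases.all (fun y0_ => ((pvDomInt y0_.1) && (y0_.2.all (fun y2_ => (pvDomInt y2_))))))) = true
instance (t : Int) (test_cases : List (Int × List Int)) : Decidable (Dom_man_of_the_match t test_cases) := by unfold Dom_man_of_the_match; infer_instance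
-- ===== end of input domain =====

-- One-line summary: B builds a per-ball parity table ((prefix count of rotating runs + j//6) mod 2)
-- and sums the two scores from it, instead of A's fused stateful striker loop; equal on Pre_ (no IndexError).

-- ===== PORT A =====
-- body of A's inner per-ball loop (runs[j] via pyGetD: Pre_ guarantees the index is in range, where Python would raise IndexError)
def pvStepA (runs : List Int) (st : Int × Int × String) (j : Int) : Int × Int × String :=
  let virat := st.1
  let ab := st.2.1
  let striker := st.2.2
  let ab' := if striker == "AB" then ab + PySem.List.pyGetD runs j 0 else ab
  let virat' := if striker == "AB" then virat else virat + PySem.List.pyGetD runs j 0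
  let striker' := if List.contains [(1 : Int), 3] (PySem.List.pyGetD runs j 0) then
      (if striker == "AB" then "Virat" else "AB") else striker
  let striker'' := if PySem.Int.mod (j + 1) 6 == 0 then
      (if striker' == "AB" then "Virat" else "AB") else striker'
  (virat', ab', striker'')

-- A's per-test-case body
def pvCaseA (c : Int × List Int) : String :=
  let n := c.1
  let runs := c.2
  let balls := 6 * n
  let st := (PySem.List.pyRange 0 balls 1).foldl (pvStepA runs) (0, 0, "AB")
  if st.1 > st.2.1 then "Virat Kohli"
  else if st.2.1 > st.1 then "AB de Villiers"
  else "Tie"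

def man_of_the_match (t : Int) (test_cases : List (Int × List Int)) : List String :=
  (PySem.List.pyRange 0 t 1).foldl
    (fun results i => results ++ [pvCaseA (PySem.List.pyGetD test_cases i (0, []))]) []

-- ===== PORT B =====
-- B's parity-table builder: state (par, acc)
def pvStepPar (runs : List Int) (st : List Int × Int) (j : Int) : List Int × Int :=
  let par := st.1 ++ [PySem.Int.mod (st.2 + PySem.Int.floordiv j 6) 2]
  let acc := if List.contains [(1 : Int), 3] (PySem.List.pyGetD runs j 0) then st.2 + 1 else st.2
  (par, acc)

-- B's filtered sum: sum(runs[j] for j in range(balls) if par[j] == p)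
def pvSumPar (runs par : List Int) (balls : Int) (p : Int) : Int :=
  (PySem.List.pyRange 0 balls 1).foldl
    (fun a j => if PySem.List.pyGetD par j 0 == p then a + PySem.List.pyGetD runs j 0 else a) 0

def pvSolveB (n : Int) (runs : List Int) : String :=
  let balls := 6 * n
  let pa := (PySem.List.pyRange 0 balls 1).foldl (pvStepPar runs) ([], 0)
  let par := pa.1
  let ab := pvSumPar runs par balls 0
  let virat := pvSumPar runs par balls 1
  if virat > ab then "Virat Kohli"
  else if ab > virat then "AB de Villiers"
  else "Tie"

def man_of_the_match_alt (t : Int) (test_cases : List (Int × List Int)) : List String :=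
  (PySem.List.slice test_cases none (some (max t 0))).map (fun c => pvSolveB c.1 c.2)

-- ===== PRECONDITION & SPEC =====
-- Pre_ = exactly the inputs where Python A returns (no IndexError): t within test_cases,
-- and each of the first t cases has at least 6*n recorded balls.
def Pre_man_of_the_match (t : Int) (test_cases : List (Int × List Int)) : Prop :=
  t ≤ (test_cases.length : Int) ∧
    ∀ c ∈ test_cases.take t.toNat, 6 * c.1 ≤ (c.2.length : Int)
instance (t : Int) (test_cases : List (Int × List Int)) : Decidable (Pre_man_of_the_match t test_cases) := by unfold Pre_man_of_the_match; infer_instance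

def pvWitness_man_of_the_match : Int × (List (Int × List Int)) :=
  (1, [(1, [1, 2, 0, 4, 1, 6])])

def Spec_man_of_the_match (t : Int) (test_cases : List (Int × List Int)) (out : List String) : Prop := out = man_of_the_match_alt t test_cases
instance (t : Int) (test_cases : List (Int × List Int)) (out : List String) : Decidable (Spec_man_of_the_match t test_cases out) := by unfold Spec_man_of_the_match; infer_instance

-- ===== CLAIM (what is proved, stated in full; the proofs are below) =====
def Claim_equal_man_of_the_match : Prop := ∀ (t : Int) (test_cases : List (Int × List Int)), Dom_man_of_the_match t test_cases → Pre_man_of_the_match t test_cases → Spec_man_of_the_match t test_cases (man_of_the_match t test_cases)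

-- ===== LEMMAS AND PROOFS =====

-- closed-form description of both per-case computations
def pvOdd (r : Int) : Bool := List.contains [(1 : Int), 3] r
def pvCnt (runs : List Int) (j : Nat) : Nat :=
  (List.range j).countP (fun k => pvOdd (runs.getD k 0))
def pvPar (runs : List Int) (j : Nat) : Nat := (pvCnt runs j + j / 6) % 2
def pvScore (runs : List Int) (m : Nat) (p : Nat) : Int :=
  (((List.range m).filter (fun k => pvPar runs k == p)).map (fun k => runs.getD k 0)).sum

lemma pvCnt_succ (runs : List Int) (m : Nat) :
    pvCnt runs (m + 1) = pvCnt runs m + (if pvOdd (runs.getD m 0) then 1 else 0) := by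
  simp [pvCnt, List.range_succ, List.countP_append, List.countP_cons]

lemma pvPar_lt_two (runs : List Int) (m : Nat) : pvPar runs m < 2 :=
  Nat.mod_lt _ (by norm_num)

lemma pvPar_succ (runs : List Int) (m : Nat) :
    pvPar runs (m + 1) =
      (pvPar runs m + (if pvOdd (runs.getD m 0) then 1 else 0)
        + (if (m + 1) % 6 = 0 then 1 else 0)) % 2 := by
  simp only [pvPar, pvCnt_succ]
  split_ifs <;> omega

lemma pvScore_succ (runs : List Int) (m p : Nat) :
    pvScore runs (m + 1) p =
      pvScore runs m p + (if pvPar runs m = p then runs.getD m 0 else 0) := by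
  simp [pvScore, List.range_succ, List.filter_append]
  split <;> simp_all
lemma pvLoopA (runs : List Int) (m : Nat) :
    (PySem.List.pyRange 0 (m : Int) 1).foldl (pvStepA runs) (0, 0, "AB")
      = (pvScore runs m 1, pvScore runs m 0,
          if pvPar runs m = 0 then "AB" else "Virat") := by
  induction m with
  | zero =>
    simp [PySem.List.pyRange_one_eq_nil (by omega : (0:Int) ≤ 0), pvScore, pvPar, pvCnt]
  | succ m ih =>
    have hcast : ((m + 1 : Nat) : Int) = (m : Int) + 1 := by push_cast; ring
    rw [hcast, PySem.List.pyRange_one_succ_right (by positivity), List.foldl_append, ih]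
    have h2 := pvPar_lt_two runs m
    have hmod : (PySem.Int.mod ((m : Int) + 1) 6 == 0) = decide ((m + 1) % 6 = 0) := by
      rw [PySem.Int.mod_eq_emod_of_pos (by norm_num)]
      by_cases h : (m + 1) % 6 = 0 <;> simp [h] <;> omega
    have hc : ∀ x : Int, [(1:Int), 3].contains x = pvOdd x := fun _ => rfl
    simp only [List.foldl_cons, List.foldl_nil, pvStepA, PySem.List.pyGetD_natCast, hmod, hc]
    by_cases hpar : pvPar runs m = 0 <;>
      by_cases ho : pvOdd (runs.getD m 0) <;>
        by_cases h6 : (m + 1) % 6 = 0 <;>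
          (first
            | have hkey : pvPar runs m = 0 := hpar
            | have hkey : pvPar runs m = 1 := by omega) <;>
          (have hp1 := pvPar_succ runs m
           simp only [hkey] at hp1
           simp only [ho, h6, if_true, if_false, decide_true, decide_false] at hp1 ⊢
           norm_num at hp1 ⊢
           simp [pvScore_succ, hkey, hp1])
lemma pvLoopPar (runs : List Int) (m : Nat) :
    (PySem.List.pyRange 0 (m : Int) 1).foldl (pvStepPar runs) ([], 0)
      = ((List.range m).map (fun k => (pvPar runs k : Int)), (pvCnt runs m : Int)) := by
  induction m with
  | zero => simp [PySem.List.pyRange_one_eq_nil (by omega : (0:Int) ≤ 0), pvCnt]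
  | succ m ih =>
    have hcast : ((m + 1 : Nat) : Int) = (m : Int) + 1 := by push_cast; ring
    rw [hcast, PySem.List.pyRange_one_succ_right (by positivity), List.foldl_append, ih]
    have hc : ∀ x : Int, [(1:Int), 3].contains x = pvOdd x := fun _ => rfl
    have hfd : PySem.Int.floordiv (m : Int) 6 = ((m / 6 : Nat) : Int) :=
      PySem.Int.floordiv_natCast m 6
    have hmd : PySem.Int.mod ((pvCnt runs m : Int) + ((m / 6 : Nat) : Int)) 2
        = ((pvPar runs m : Nat) : Int) := by
      have : ((pvCnt runs m : Int) + ((m / 6 : Nat) : Int)) = ((pvCnt runs m + m / 6 : Nat) : Int) := by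
        push_cast; ring
      rw [this]
      show PySem.Int.mod _ 2 = (((pvCnt runs m + m / 6) % 2 : Nat) : Int)
      exact_mod_cast PySem.Int.mod_natCast (pvCnt runs m + m / 6) 2
    simp only [List.foldl_cons, List.foldl_nil, pvStepPar, PySem.List.pyGetD_natCast, hc, hfd, hmd]
    simp only [Prod.mk.injEq]
    constructor
    · simp [List.range_succ]
    · rw [pvCnt_succ]
      by_cases ho : pvOdd (runs.getD m 0) = true
      · rw [if_pos ho, if_pos ho]; push_cast; ring
      · rw [if_neg ho, if_neg ho]; push_cast; ring

lemma pvSumPar_aux (runs : List Int) (m m' p : Nat) (hm : m' ≤ m) :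
    pvSumPar runs ((List.range m).map (fun k => (pvPar runs k : Int))) (m' : Int) (p : Int)
      = pvScore runs m' p := by
  induction m' with
  | zero => simp [pvSumPar, PySem.List.pyRange_one_eq_nil (by omega : (0:Int) ≤ 0), pvScore]
  | succ m' ih =>
    have hcast : ((m' + 1 : Nat) : Int) = (m' : Int) + 1 := by push_cast; ring
    unfold pvSumPar at ih ⊢
    rw [hcast, PySem.List.pyRange_one_succ_right (by positivity), List.foldl_append,
      ih (by omega)]
    have hget : PySem.List.pyGetD ((List.range m).map (fun k => (pvPar runs k : Int))) (m' : Int) 0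
        = ((pvPar runs m' : Nat) : Int) := by
      rw [PySem.List.pyGetD_natCast]
      rw [PySem.List.getD_map_range _ m m' 0 (by omega)]
    simp only [List.foldl_cons, List.foldl_nil, hget, PySem.List.pyGetD_natCast]
    rw [pvScore_succ]
    by_cases hp : pvPar runs m' = p
    · simp [hp]
    · have : ¬ (((pvPar runs m' : Nat) : Int) == (p : Int)) = true := by
        simp [hp]
      simp [this, hp]
lemma pvCase_eq (c : Int × List Int) : pvCaseA c = pvSolveB c.1 c.2 := by
  obtain ⟨n, runs⟩ := c
  unfold pvCaseA pvSolveB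
  dsimp only
  by_cases h : 0 ≤ 6 * n
  · have hm : 6 * n = ((6 * n).toNat : Int) := by omega
    rw [hm, pvLoopA runs (6 * n).toNat, pvLoopPar runs (6 * n).toNat]
    dsimp only
    rw [show (0:Int) = ((0:Nat):Int) from rfl, show (1:Int) = ((1:Nat):Int) from rfl,
      pvSumPar_aux runs _ _ 0 le_rfl, pvSumPar_aux runs _ _ 1 le_rfl]
  · rw [PySem.List.pyRange_one_eq_nil (show 6 * n ≤ 0 by omega)]
    dsimp only [List.foldl_nil]
    simp [pvSumPar, PySem.List.pyRange_one_eq_nil (show 6 * n ≤ 0 by omega)]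

lemma pvTakeMap (tcs : List (Int × List Int)) (k : Nat) (hk : k ≤ tcs.length) :
    (PySem.List.pyRange 0 (k : Int) 1).map
        (fun i => pvCaseA (PySem.List.pyGetD tcs i (0, [])))
      = (tcs.take k).map pvCaseA := by
  induction k with
  | zero => simp [PySem.List.pyRange_one_eq_nil (by omega : (0:Int) ≤ 0)]
  | succ k ih =>
    have hcast : ((k + 1 : Nat) : Int) = (k : Int) + 1 := by push_cast; ring
    rw [hcast, PySem.List.pyRange_one_succ_right (by positivity), List.map_append,
      ih (by omega)]
    have hk' : k < tcs.length := by omega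
    rw [List.take_add_one]
    simp [PySem.List.pyGetD_natCast, List.getD, List.getElem?_eq_getElem hk']
    rw [List.take_add_one]
    simp [List.getElem?_eq_getElem hk']

-- ===== VERDICT (by name: the statement is the Claim_ definition above) =====
theorem man_of_the_match_spec : Claim_equal_man_of_the_match := by
  intro t tcs hdom hpre
  unfold Pre_man_of_the_match at hpre
  obtain ⟨hlen, -⟩ := hpre
  unfold Spec_man_of_the_match man_of_the_match man_of_the_match_alt
  rw [PySem.List.foldl_append_singleton_eq_map]
  have hmap : ∀ l : List (Int × List Int), l.map pvCaseA = l.map (fun c => pvSolveB c.1 c.2) :=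
    fun l => List.map_congr_left (fun c _ => pvCase_eq c)
  by_cases ht : 0 < t
  · have hmax : max t 0 = t := by omega
    rw [hmax, PySem.List.slice_to tcs (by omega)]
    have hcast : t = (t.toNat : Int) := by omega
    conv_lhs => rw [hcast]
    rw [pvTakeMap tcs t.toNat (by omega : t.toNat ≤ tcs.length), hmap]
    simp
  · have hmax : max t 0 = (0 : Int) := by omega
    rw [hmax, PySem.List.slice_to tcs le_rfl, PySem.List.pyRange_one_eq_nil (by omega : t ≤ 0)]
    simp
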